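-- pv_equiv track=rewrite | github.com/elkcl/inf | final/11.py | destroyChain
-- ===== SOURCE A (Python) =====
-- def destroyChain(list):
--     for i in range(len(list)):
--         k = i
--         while k < len(list)-1 and list[k] == list[k+1]:
--             k += 1
--         if k - i >= 2:
--             for j in range(i, k+1):
--                 list.pop(i)
--             return True, k-i+1
--     return False, 0
-- ===== SOURCE B (Python) =====
-- from itertools import groupby
--
-- def destroyChain(list):
--     runs = [(key, len(tuple(g))) for key, g in groupby(list)]
--     idx = 0
--     for _, length in runs:
--         if length >= 3:
--             del list[idx:idx + length]
--             return True, length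
--         idx += length
--     return False, 0
-- ===== Notes on version B (the rewrite author's own statement) =====
-- stated objective: idiomatic
-- what changed: A's nested positional scan (for each index, an inner while extending equal elements, then element-by-element pop) is replaced by a group-first decomposition: build the run-length encoding with itertools.groupby once, scan the runs for the first of length >= 3, and delete that slice in place.
import Mathlib
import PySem

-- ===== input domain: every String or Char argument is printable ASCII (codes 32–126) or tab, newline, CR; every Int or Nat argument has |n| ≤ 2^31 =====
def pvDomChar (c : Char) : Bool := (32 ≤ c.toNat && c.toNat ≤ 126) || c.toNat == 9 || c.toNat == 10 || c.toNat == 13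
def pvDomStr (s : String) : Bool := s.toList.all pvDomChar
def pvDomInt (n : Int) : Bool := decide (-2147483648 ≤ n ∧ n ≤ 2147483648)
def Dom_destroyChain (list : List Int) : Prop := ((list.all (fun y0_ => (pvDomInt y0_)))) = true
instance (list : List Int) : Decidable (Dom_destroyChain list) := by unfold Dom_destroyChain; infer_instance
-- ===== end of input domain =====

-- B replaces A's nested positional scan by a run-length-encoding (groupby) scan; equivalence is
-- about the RETURN value only (both Pythons also delete the found run from the list in place).

-- ===== PORT A =====
-- inner 'while k < len(list)-1 and list[k] == list[k+1]: k += 1'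
def pvWhileK (list : List Int) (k : Nat) : Nat :=
  if k < list.length - 1 ∧ list.getD k 0 = list.getD (k + 1) 0 then
    pvWhileK list (k + 1)
  else k
termination_by list.length - k
decreasing_by omega

-- the 'for i in range(len(list))' loop; the pop-loop only mutates, the return value is k-i+1
def pvALoop (list : List Int) : List Nat → Bool × Int
  | [] => (false, 0)
  | i :: is =>
    let k := pvWhileK list i
    if k - i ≥ 2 then (true, (k : Int) - (i : Int) + 1) else pvALoop list is

def destroyChain (list : List Int) : Bool × Int :=
  pvALoop list (List.range list.length)

-- ===== PORT B =====
-- [(key, len(tuple(g))) for key, g in groupby(list)]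
def pvRuns : List Int → List (Int × Nat)
  | [] => []
  | x :: xs =>
    match pvRuns xs with
    | [] => [(x, 1)]
    | (y, n) :: rs => if x = y then (x, n + 1) :: rs else (x, 1) :: (y, n) :: rs

-- the 'for _, length in runs' loop (idx is only used for the in-place deletion)
def pvBLoop : Nat → List (Int × Nat) → Bool × Int
  | _, [] => (false, 0)
  | idx, (_, len) :: rs =>
    if len ≥ 3 then (true, (len : Int)) else pvBLoop (idx + len) rs

def destroyChain_alt (list : List Int) : Bool × Int :=
  pvBLoop 0 (pvRuns list)

-- ===== PRECONDITION & SPEC =====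
def Spec_destroyChain (list : List Int) (out : Bool × Int) : Prop := out = destroyChain_alt list
instance (list : List Int) (out : Bool × Int) : Decidable (Spec_destroyChain list out) := by unfold Spec_destroyChain; infer_instance

-- ===== CLAIM (what is proved, stated in full; the proofs are below) =====
def Claim_equal_destroyChain : Prop := ∀ (list : List Int), Dom_destroyChain list → Spec_destroyChain list (destroyChain list)

-- ===== LEMMAS AND PROOFS =====

theorem pvBLoop_idx (rs : List (Int × Nat)) : ∀ i j, pvBLoop i rs = pvBLoop j rs := by
  induction rs with
  | nil => intro i j; rfl
  | cons p rs ih =>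
    intro i j
    obtain ⟨y, n⟩ := p
    simp only [pvBLoop]
    split
    · rfl
    · exact ih _ _

theorem pvRuns_head : ∀ (l : List Int) (y : Int) (n : Nat) (rs : List (Int × Nat)),
    pvRuns l = (y, n) :: rs → l.head? = some y := by
  intro l
  induction l with
  | nil => intro y n rs h; simp [pvRuns] at h
  | cons x xs ih =>
    intro y n rs h
    simp only [pvRuns] at h
    rcases hx : pvRuns xs with _ | ⟨⟨z, m⟩, rs'⟩ <;> rw [hx] at h
    · simp at h; simp [h.1]
    · by_cases hz : x = z
      · simp [hz] at h
        simp [hz, h.1.1]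
      · simp [hz] at h
        simp [h.1.1]

theorem pvRuns_replicate (x : Int) (rest : List Int) (hrest : rest.head? ≠ some x) :
    ∀ c, 1 ≤ c → pvRuns (List.replicate c x ++ rest) = (x, c) :: pvRuns rest := by
  intro c
  induction c with
  | zero => intro h; omega
  | succ c ih =>
    intro _
    by_cases hc : 1 ≤ c
    · have := ih hc
      simp only [List.replicate_succ, List.cons_append, pvRuns, this]
      simp
    · have hc0 : c = 0 := by omega
      subst hc0
      simp only [List.replicate_succ, List.replicate_zero, List.nil_append, List.cons_append,
        List.nil_append, pvRuns]
      rcases hx : pvRuns rest with _ | ⟨⟨z, m⟩, rs'⟩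
      · rfl
      · have hz : rest.head? = some z := pvRuns_head rest z m rs' hx
        have : x ≠ z := by intro h; exact hrest (h ▸ hz)
        simp [this]

-- getD of an append beyond the prefix
theorem getD_append_right' (pre rest : List Int) (j : Nat) :
    (pre ++ rest).getD (pre.length + j) 0 = rest.getD j 0 := by
  simp [List.getD, List.getElem?_append_right (by omega : pre.length ≤ pre.length + j)]

theorem pvWhileK_eq (list : List Int) (k : Nat) :
    pvWhileK list k =
      if k < list.length - 1 ∧ list.getD k 0 = list.getD (k + 1) 0 then
        pvWhileK list (k + 1)
      else k := by
  rw [pvWhileK]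

theorem pvWhileK_shift (pre rest : List Int) : ∀ k,
    pvWhileK (pre ++ rest) (pre.length + k) = pre.length + pvWhileK rest k := by
  intro k
  induction hn : rest.length - k using Nat.strong_induction_on generalizing k with
  | _ n ih =>
    rw [pvWhileK_eq (pre ++ rest) (pre.length + k), pvWhileK_eq rest k]
    have hlen : (pre ++ rest).length = pre.length + rest.length := by simp
    by_cases hcond : k < rest.length - 1 ∧ rest.getD k 0 = rest.getD (k + 1) 0
    · have h1 : pre.length + k < (pre ++ rest).length - 1 := by omega
      have h2 : (pre ++ rest).getD (pre.length + k) 0 = (pre ++ rest).getD (pre.length + k + 1) 0 := by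
        rw [getD_append_right']
        have : pre.length + k + 1 = pre.length + (k + 1) := by omega
        rw [this, getD_append_right']
        exact hcond.2
      rw [if_pos ⟨h1, h2⟩, if_pos hcond]
      have : pre.length + k + 1 = pre.length + (k + 1) := by omega
      rw [this]
      exact ih (rest.length - (k + 1)) (by omega) (k + 1) rfl
    · have hcond' : ¬ (pre.length + k < (pre ++ rest).length - 1 ∧
          (pre ++ rest).getD (pre.length + k) 0 = (pre ++ rest).getD (pre.length + k + 1) 0) := by
        intro ⟨h1, h2⟩
        apply hcond
        constructor
        · omega
        · rw [getD_append_right'] at h2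
          have heq : pre.length + k + 1 = pre.length + (k + 1) := by omega
          rw [heq, getD_append_right'] at h2
          exact h2
      rw [if_neg hcond', if_neg hcond]

theorem pvALoop_shift (pre rest : List Int) : ∀ is : List Nat,
    pvALoop (pre ++ rest) (is.map (pre.length + ·)) = pvALoop rest is := by
  intro is
  induction is with
  | nil => rfl
  | cons i is ih =>
    simp only [List.map_cons, pvALoop, pvWhileK_shift]
    have h1 : pre.length + pvWhileK rest i - (pre.length + i) = pvWhileK rest i - i := by omega
    rw [h1]
    split
    · congr 1
      push_cast
      ring
    · exact ih

-- within a maximal first run of length c (run elements x, rest does not start with x),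
-- the inner while started at i < c stops at c - 1
theorem pvWhileK_run (x : Int) (rest : List Int) (hrest : rest.head? ≠ some x) (c : Nat) :
    ∀ i, i < c → pvWhileK (List.replicate c x ++ rest) i = c - 1 := by
  intro i hi
  induction hn : c - 1 - i using Nat.strong_induction_on generalizing i with
  | _ n ih =>
    have hlen : (List.replicate c x ++ rest).length = c + rest.length := by simp
    rw [pvWhileK_eq (List.replicate c x ++ rest) i]
    have hgetrun : ∀ j, j < c → (List.replicate c x ++ rest).getD j 0 = x := by
      intro j hj
      simp [List.getD, List.getElem?_append_left (by simp; omega : j < (List.replicate c x).length),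
        hj]
    by_cases hlast : i < c - 1
    · have h1 : i < (List.replicate c x ++ rest).length - 1 := by omega
      have h2 : (List.replicate c x ++ rest).getD i 0 = (List.replicate c x ++ rest).getD (i + 1) 0 := by
        rw [hgetrun i (by omega), hgetrun (i + 1) (by omega)]
      rw [if_pos ⟨h1, h2⟩]
      exact ih (c - 1 - (i + 1)) (by omega) (i + 1) (by omega) rfl
    · have hieq : i = c - 1 := by omega
      rcases hr : rest with _ | ⟨z, zs⟩
      · subst hr
        have : ¬ (i < (List.replicate c x ++ ([] : List Int)).length - 1 ∧
            (List.replicate c x ++ ([] : List Int)).getD i 0 = (List.replicate c x ++ ([] : List Int)).getD (i + 1) 0) := by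
          simp; omega
        rw [if_neg this]; omega
      · subst hr
        have hget1 : (List.replicate c x ++ z :: zs).getD i 0 = x := hgetrun i (by omega)
        have hget2 : (List.replicate c x ++ z :: zs).getD (i + 1) 0 = z := by
          have hip : i + 1 = (List.replicate c x).length + 0 := by simp; omega
          rw [hip, getD_append_right' (List.replicate c x) (z :: zs) 0]
          rfl
        have hzx : z ≠ x := by
          intro h; exact hrest (by simp [h])
        have : ¬ (i < (List.replicate c x ++ z :: zs).length - 1 ∧
            (List.replicate c x ++ z :: zs).getD i 0 = (List.replicate c x ++ z :: zs).getD (i + 1) 0) := by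
          intro ⟨_, h2⟩
          rw [hget1, hget2] at h2
          exact hzx h2.symm
        rw [if_neg this]; omega

-- A on the first run's indices: returns for c ≥ 3, otherwise falls through to the rest
theorem pvALoop_firstRun (x : Int) (rest : List Int) (hrest : rest.head? ≠ some x)
    (c : Nat) (hc : 1 ≤ c) :
    destroyChain (List.replicate c x ++ rest) =
      if 3 ≤ c then (true, (c : Int)) else destroyChain rest := by
  have hlen : (List.replicate c x ++ rest).length = c + rest.length := by simp
  unfold destroyChain
  rw [hlen, List.range_add]
  have hmap : (List.range rest.length).map (c + ·) = (List.range rest.length).map ((List.replicate c x).length + ·) := by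
    simp
  by_cases h3 : 3 ≤ c
  · -- first index 0 already returns
    have h0 : 0 < c := by omega
    rcases hr : List.range c with _ | ⟨a, as⟩
    · exfalso; have := List.length_range (n := c); rw [hr] at this; simp at this; omega
    · have ha : a = 0 := by
        have := List.range_succ_eq_map (n := c - 1)
        have hc' : c = (c - 1) + 1 := by omega
        rw [hc', List.range_succ_eq_map] at hr
        simp at hr
        exact hr.1.symm
      subst ha
      simp only [List.cons_append, pvALoop]
      rw [pvWhileK_run x rest hrest c 0 h0]
      have : c - 1 - 0 ≥ 2 := by omega
      rw [if_pos this, if_pos h3]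
      simp
      omega
  · -- no index in the first run fires; then shift to rest
    rw [if_neg h3]
    have hfall : ∀ is', (∀ i ∈ is', i < c) →
        pvALoop (List.replicate c x ++ rest)
          (is' ++ (List.range rest.length).map (c + ·)) =
        pvALoop (List.replicate c x ++ rest) ((List.range rest.length).map (c + ·)) := by
      intro is' hmem
      induction is' with
      | nil => simp
      | cons i is'' ih =>
        have hi : i < c := hmem i (by simp)
        simp only [List.cons_append, pvALoop]
        rw [pvWhileK_run x rest hrest c i hi]
        have : ¬ (c - 1 - i ≥ 2) := by omega
        rw [if_neg this]
        exact ih (fun j hj => hmem j (by simp [hj]))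
    rw [hfall (List.range c) (fun i hi => List.mem_range.mp hi)]
    rw [hmap, pvALoop_shift]

theorem main_equiv : ∀ (list : List Int), destroyChain list = destroyChain_alt list := by
  have key : ∀ n (l : List Int), l.length ≤ n → destroyChain l = destroyChain_alt l := by
    intro n
    induction n with
    | zero =>
      intro l hl
      have : l = [] := List.eq_nil_of_length_eq_zero (by omega)
      subst this; rfl
    | succ n ih =>
      intro l hl
      rcases l with _ | ⟨x, xs⟩
      · rfl
      · -- decompose the first run: c = 1 + |takeWhile (= x) xs|, rest = dropWhile (= x) xs
        set t := xs.takeWhile (fun z => z = x) with ht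
        set rest := xs.dropWhile (fun z => z = x) with hrest
        have hsplit : xs = t ++ rest := (List.takeWhile_append_dropWhile).symm
        have htrep : t = List.replicate t.length x := by
          apply List.eq_replicate_length.mpr
          intro b hb
          have := List.mem_takeWhile_imp (l := xs) (p := fun z => z = x) (ht ▸ hb)
          simpa using this
        have hdec : x :: xs = List.replicate (t.length + 1) x ++ rest := by
          rw [List.replicate_succ, List.cons_append, ← htrep, ← hsplit]
        have hhead : rest.head? ≠ some x := by
          intro h
          have hz := List.head?_dropWhile_not (p := fun z => decide (z = x)) (l := xs)
          rw [← hrest, h] at hz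
          simp at hz
        have hlenrest : rest.length ≤ xs.length := by
          rw [hsplit]; simp
        have hArun := pvALoop_firstRun x rest hhead (t.length + 1) (by omega)
        have hBrun := pvRuns_replicate x rest hhead (t.length + 1) (by omega)
        rw [hdec, hArun]
        unfold destroyChain_alt
        rw [hBrun]
        simp only [pvBLoop]
        by_cases h3 : 3 ≤ t.length + 1
        · rw [if_pos h3, if_pos (by omega : t.length + 1 ≥ 3)]
        · rw [if_neg h3, if_neg (by omega : ¬ t.length + 1 ≥ 3)]
          rw [pvBLoop_idx (pvRuns rest) (0 + (t.length + 1)) 0]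
          have : destroyChain rest = destroyChain_alt rest := by
            apply ih
            have : xs.length ≤ n := by simpa using hl
            omega
          rw [this]
          rfl
  intro l
  exact key l.length l le_rfl

-- ===== VERDICT (by name: the statement is the Claim_ definition above) =====
theorem destroyChain_spec : Claim_equal_destroyChain := by
  intro l _
  unfold Spec_destroyChain
  exact main_equiv l
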